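-- pv_equiv track=rewrite | github.com/kaija/cassandra-ops-mcp | src/nodetool_executor.py | _parse_netstats_output
-- ===== SOURCE A (Python) =====
-- from typing import List, Optional, Dict, Any
--
-- def _parse_netstats_output(output: str) -> Dict[str, Any]:
--     """Parse nodetool netstats output.
--
--     Args:
--         output: Raw netstats output
--
--     Returns:
--         Parsed netstats data
--     """
--     # For netstats, we'll keep it simple and return sections
--     sections = {}
--     current_section = None
--     section_content = []
--
--     for line in output.strip().split('\n'):
--         if line and not line.startswith(' '):
--             # New section
--             if current_section:
--                 sections[current_section] = '\n'.join(section_content)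
--             current_section = line.strip()
--             section_content = []
--         else:
--             section_content.append(line)
--
--     # Add last section
--     if current_section:
--         sections[current_section] = '\n'.join(section_content)
--
--     return sections
-- ===== SOURCE B (Python) =====
-- def _is_header(line):
--     return bool(line) and not line.startswith(' ')
--
-- def _split_body(lines):
--     """Split off the longest prefix of non-header lines: (body, rest)."""
--     for k, l in enumerate(lines):
--         if _is_header(l):
--             return lines[:k], lines[k:]
--     return lines, []
--
-- def _parse_netstats_output(output):
--     _, rest = _split_body(output.strip().split('\n'))
--     sections = {}
--     while rest:
--         body, nxt = _split_body(rest[1:])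
--         name = rest[0].strip()
--         if name:
--             sections[name] = '\n'.join(body)
--         rest = nxt
--     return sections
-- ===== Notes on version B (the rewrite author's own statement) =====
-- stated objective: alternative
-- what changed: Replaces A's single accumulate-and-flush pass with mutable current-section state by a span/group decomposition: a _split_body helper splits off the longest run of non-header lines, lines before the first header are split off and dropped, then each header and its body slice are consumed group by group.
import Mathlib
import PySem

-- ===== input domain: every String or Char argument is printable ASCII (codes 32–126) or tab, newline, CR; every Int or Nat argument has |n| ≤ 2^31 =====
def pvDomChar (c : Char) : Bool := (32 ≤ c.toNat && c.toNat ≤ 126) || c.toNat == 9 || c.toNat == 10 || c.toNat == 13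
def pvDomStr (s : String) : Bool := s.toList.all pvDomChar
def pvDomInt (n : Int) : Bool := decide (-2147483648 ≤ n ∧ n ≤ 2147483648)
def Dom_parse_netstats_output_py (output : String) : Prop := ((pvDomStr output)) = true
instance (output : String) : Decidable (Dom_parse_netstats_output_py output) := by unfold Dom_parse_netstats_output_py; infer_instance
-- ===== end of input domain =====

-- B parses by repeatedly splitting the line list at header positions (span/group decomposition)
-- instead of A's single accumulate-and-flush pass; objective: alternative decomposition, same cost.


-- ===== PORT A =====
-- 'if current_section: sections[current_section] = "\n".join(section_content)' (appears twice in A)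
def pvFlushA (d : PySem.Dict String String) (cur : Option String) (content : List String) :
    PySem.Dict String String :=
  match cur with
  | some c => if c ≠ "" then d.insert c (PySem.Str.join "\n" content) else d
  | none => d

-- one iteration of A's for-loop; state = (sections, current_section, section_content)
def pvStepA (st : PySem.Dict String String × Option String × List String) (line : String) :
    PySem.Dict String String × Option String × List String :=
  if line ≠ "" ∧ PySem.Str.startswith line " " = false then
    (pvFlushA st.1 st.2.1 st.2.2, some (PySem.Str.strip line), [])
  else
    (st.1, st.2.1, st.2.2 ++ [line])

-- s.split('\n'): the separator is non-empty, so PySem.Str.split? is always 'some'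
def pvSplitNL (s : String) : List String :=
  (PySem.Str.split? s "\n").getD []

def parse_netstats_output_py (output : String) : List (String × String) :=
  let st := (pvSplitNL (PySem.Str.strip output)).foldl pvStepA
              (PySem.Dict.empty, none, [])
  (pvFlushA st.1 st.2.1 st.2.2).items

-- ===== PORT B =====
def pvIsHeader (line : String) : Bool :=
  !(line == "") && !(PySem.Str.startswith line " ")

-- Source B's _split_body: longest prefix of non-header lines, plus the remainder
-- (the Python scans with enumerate and slices; this is the same scan as structural recursion)
def pvSplitBody : List String → List String × List String
  | [] => ([], [])
  | l :: ls =>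
      if pvIsHeader l then ([], l :: ls)
      else
        let p := pvSplitBody ls
        (l :: p.1, p.2)

theorem pvSplitBody_snd_len (ls : List String) : (pvSplitBody ls).2.length ≤ ls.length := by
  induction ls with
  | nil => simp [pvSplitBody]
  | cons l ls ih =>
      simp only [pvSplitBody]
      split
      · simp
      · simpa using Nat.le_succ_of_le ih

-- Source B's while-loop over 'rest': head is a section header, split off its body, recurse
def pvGroups (rest : List String) (sections : PySem.Dict String String) :
    PySem.Dict String String :=
  match rest with
  | [] => sections
  | h :: tl =>
      let p := pvSplitBody tl
      let name := PySem.Str.strip h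
      pvGroups p.2 (if name ≠ "" then sections.insert name (PySem.Str.join "\n" p.1) else sections)
  termination_by rest.length
  decreasing_by simpa using Nat.lt_succ_of_le (pvSplitBody_snd_len tl)

def parse_netstats_output_py_alt (output : String) : List (String × String) :=
  (pvGroups (pvSplitBody (pvSplitNL (PySem.Str.strip output))).2 PySem.Dict.empty).items

-- ===== PRECONDITION & SPEC =====
def Spec_parse_netstats_output_py (output : String) (out : List (String × String)) : Prop := out = parse_netstats_output_py_alt output
instance (output : String) (out : List (String × String)) : Decidable (Spec_parse_netstats_output_py output out) := by unfold Spec_parse_netstats_output_py; infer_instance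

-- ===== CLAIM (what is proved, stated in full; the proofs are below) =====
def Claim_equal_parse_netstats_output_py : Prop := ∀ (output : String), Dom_parse_netstats_output_py output → Spec_parse_netstats_output_py output (parse_netstats_output_py output)

-- ===== LEMMAS AND PROOFS =====
-- A's "add last section" applied to the loop state, as one function (so the invariants rewrite cleanly)
def pvFinishA (st : PySem.Dict String String × Option String × List String) :
    PySem.Dict String String :=
  pvFlushA st.1 st.2.1 st.2.2

theorem pvIsHeader_iff (l : String) :
    pvIsHeader l = true ↔ (l ≠ "" ∧ PySem.Str.startswith l " " = false) := by
  simp only [pvIsHeader, Bool.and_eq_true, Bool.not_eq_true', beq_eq_false_iff_ne]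

theorem pvLoopSome (lines : List String) (d : PySem.Dict String String) (c : String)
    (content : List String) :
    pvFinishA (lines.foldl pvStepA (d, some c, content))
    = pvGroups (pvSplitBody lines).2
        (if c ≠ "" then d.insert c (PySem.Str.join "\n" (content ++ (pvSplitBody lines).1)) else d) := by
  induction lines generalizing d c content with
  | nil => simp [pvSplitBody, pvGroups, pvFinishA, pvFlushA]
  | cons l ls ih =>
      by_cases hl : l ≠ "" ∧ PySem.Str.startswith l " " = false
      · have hb : pvIsHeader l = true := (pvIsHeader_iff l).mpr hl
        simp only [List.foldl_cons, pvStepA, if_pos hl, pvSplitBody, hb, if_pos, List.append_nil]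
        rw [ih]
        conv_rhs => rw [pvGroups]
        simp [pvFlushA]
      · have hb : pvIsHeader l = false := by
          rcases Bool.eq_false_or_eq_true (pvIsHeader l) with h | h
          · exact absurd ((pvIsHeader_iff l).mp h) hl
          · exact h
        simp only [List.foldl_cons, pvStepA, if_neg hl, pvSplitBody, hb, Bool.false_eq_true,
          ite_false]
        rw [ih]
        simp

theorem pvLoopNone (lines : List String) (d : PySem.Dict String String)
    (content : List String) :
    pvFinishA (lines.foldl pvStepA (d, none, content))
    = pvGroups (pvSplitBody lines).2 d := by
  induction lines generalizing content with
  | nil => simp [pvSplitBody, pvGroups, pvFinishA, pvFlushA]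
  | cons l ls ih =>
      by_cases hl : l ≠ "" ∧ PySem.Str.startswith l " " = false
      · have hb : pvIsHeader l = true := (pvIsHeader_iff l).mpr hl
        simp only [List.foldl_cons, pvStepA, if_pos hl, pvFlushA, pvSplitBody, hb, if_pos]
        rw [pvLoopSome]
        conv_rhs => rw [pvGroups]
        simp
      · have hb : pvIsHeader l = false := by
          rcases Bool.eq_false_or_eq_true (pvIsHeader l) with h | h
          · exact absurd ((pvIsHeader_iff l).mp h) hl
          · exact h
        simp only [List.foldl_cons, pvStepA, if_neg hl, pvSplitBody, hb, Bool.false_eq_true,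
          ite_false]
        exact ih _

-- ===== VERDICT (by name: the statement is the Claim_ definition above) =====
theorem parse_netstats_output_py_spec : Claim_equal_parse_netstats_output_py := by
  intro output _
  show parse_netstats_output_py output = parse_netstats_output_py_alt output
  unfold parse_netstats_output_py parse_netstats_output_py_alt
  show (pvFinishA _).items = _
  rw [pvLoopNone]
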